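-- pv_equiv track=rewrite | github.com/damarisarmoa12/Intro | parcialpython.py | quien_gano_el_tateti_facilito
-- ===== SOURCE A (Python) =====
-- def quien_gano_el_tateti_facilito (tablero : list[list[str]]) -> int:
--     hay_x = False
--     hay_o = False
--
--
--     for i in range(len(tablero)-2):
--         for j in range(len(tablero[0])):
--             c1 = tablero[i][j]
--             c2 = tablero[i+1][j]
--             c3 = tablero[i+2][j]
--
--             if c1 == c2 == c3:
--              if c1 == "X":
--                 hay_x = True
--              if c1 == "O":
--                 hay_o = True
--
--     if hay_x and hay_o:
--         return 3
--     elif hay_x: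
--         return 1
--     elif hay_o:
--         return 2
--     else:
--         return 0
-- ===== SOURCE B (Python) =====
-- def quien_gano_el_tateti_facilito(tablero):
--     # Column-major single pass with run-length counters instead of sliding triple comparisons.
--     if len(tablero) < 3:
--         return 0
--     hay_x = False
--     hay_o = False
--     for j in range(len(tablero[0])):
--         run_x = 0
--         run_o = 0
--         for fila in tablero:
--             c = fila[j]
--             run_x = run_x + 1 if c == "X" else 0
--             run_o = run_o + 1 if c == "O" else 0
--             if run_x >= 3:
--                 hay_x = True
--             if run_o >= 3:
--                 hay_o = True
--     return 3 if hay_x and hay_o else 1 if hay_x else 2 if hay_o else 0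
-- ===== Notes on version B (the rewrite author's own statement) =====
-- stated objective: alternative
-- what changed: Replaces A's row-major nested scan comparing each vertical triple (tablero[i][j]==tablero[i+1][j]==tablero[i+2][j]) with a column-major single pass that maintains run-length counters for 'X' and 'O' per column and sets the flags when a run reaches 3, with an early return 0 for boards of fewer than 3 rows.
import Mathlib
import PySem

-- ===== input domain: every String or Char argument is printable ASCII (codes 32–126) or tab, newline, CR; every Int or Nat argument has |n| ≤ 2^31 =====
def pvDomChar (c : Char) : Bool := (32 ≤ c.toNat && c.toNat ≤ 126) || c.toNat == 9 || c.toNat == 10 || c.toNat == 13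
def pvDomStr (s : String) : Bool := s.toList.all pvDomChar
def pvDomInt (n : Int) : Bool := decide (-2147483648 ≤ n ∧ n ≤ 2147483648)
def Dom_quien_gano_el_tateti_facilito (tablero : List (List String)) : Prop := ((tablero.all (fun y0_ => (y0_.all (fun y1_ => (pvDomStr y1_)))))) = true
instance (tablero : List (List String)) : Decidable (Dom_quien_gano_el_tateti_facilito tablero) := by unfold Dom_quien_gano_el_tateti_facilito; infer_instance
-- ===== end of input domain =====

-- B replaces A's row-major sliding-triple scan with a column-major single pass keeping
-- run-length counters per column (alternative decomposition, similar cost).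


-- ===== PORT A =====
-- body of A's inner loop: compare the vertical triple at (i, j), set the flags
def pvBodyA (tablero : List (List String)) (i : Int) (hay : Bool × Bool) (j : Int) : Bool × Bool :=
  let c1 := PySem.List.pyGetD (PySem.List.pyGetD tablero i []) j ""
  let c2 := PySem.List.pyGetD (PySem.List.pyGetD tablero (i + 1) []) j ""
  let c3 := PySem.List.pyGetD (PySem.List.pyGetD tablero (i + 2) []) j ""
  if c1 = c2 ∧ c2 = c3 then
    let hx := if c1 = "X" then true else hay.1
    let ho := if c1 = "O" then true else hay.2
    (hx, ho)
  else hay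

def quien_gano_el_tateti_facilito (tablero : List (List String)) : Int :=
  let hay := (PySem.List.pyRange 0 ((tablero.length : Int) - 2) 1).foldl
    (fun (hay : Bool × Bool) i =>
      (PySem.List.pyRange 0 (((PySem.List.pyGetD tablero 0 []).length : Int)) 1).foldl
        (pvBodyA tablero i) hay) (false, false)
  if hay.1 ∧ hay.2 then 3 else if hay.1 then 1 else if hay.2 then 2 else 0

-- ===== PORT B =====
-- one step of B's inner loop: update the two run counters, set a flag when a run reaches 3
def pvRunStep (st : Bool × Bool × Int × Int) (c : String) : Bool × Bool × Int × Int :=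
  let rx := if c = "X" then st.2.2.1 + 1 else 0
  let ro := if c = "O" then st.2.2.2 + 1 else 0
  ((if 3 ≤ rx then true else st.1), (if 3 ≤ ro then true else st.2.1), rx, ro)

-- body of B's outer loop: walk column j once with fresh run counters
def pvColB (tablero : List (List String)) (hay : Bool × Bool) (j : Int) : Bool × Bool :=
  let st := tablero.foldl
    (fun st fila => pvRunStep st (PySem.List.pyGetD fila j ""))
    (hay.1, hay.2, 0, 0)
  (st.1, st.2.1)

def quien_gano_el_tateti_facilito_alt (tablero : List (List String)) : Int :=
  if tablero.length < 3 then 0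
  else
    let hay := (PySem.List.pyRange 0 (((PySem.List.pyGetD tablero 0 []).length : Int)) 1).foldl
      (pvColB tablero) (false, false)
    if hay.1 ∧ hay.2 then 3 else if hay.1 then 1 else if hay.2 then 2 else 0

-- ===== PRECONDITION & SPEC =====
-- Pre_ excludes exactly the boards on which the Python A raises IndexError (at least 3 rows
-- and some row shorter than row 0); B's Python raises on exactly the same boards.
def Pre_quien_gano_el_tateti_facilito (tablero : List (List String)) : Prop :=
  tablero.length < 3 ∨ ∀ fila ∈ tablero, (tablero.headD []).length ≤ fila.length
instance (tablero : List (List String)) : Decidable (Pre_quien_gano_el_tateti_facilito tablero) := by unfold Pre_quien_gano_el_tateti_facilito; infer_instance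

def pvWitness_quien_gano_el_tateti_facilito : List (List String) :=
  [["X", "O"], ["X", "O"], ["X", "Z"]]

def Spec_quien_gano_el_tateti_facilito (tablero : List (List String)) (out : Int) : Prop := out = quien_gano_el_tateti_facilito_alt tablero
instance (tablero : List (List String)) (out : Int) : Decidable (Spec_quien_gano_el_tateti_facilito tablero out) := by unfold Spec_quien_gano_el_tateti_facilito; infer_instance

-- ===== CLAIM (what is proved, stated in full; the proofs are below) =====
def Claim_equal_quien_gano_el_tateti_facilito : Prop := ∀ (tablero : List (List String)), Dom_quien_gano_el_tateti_facilito tablero → Pre_quien_gano_el_tateti_facilito tablero → Spec_quien_gano_el_tateti_facilito tablero (quien_gano_el_tateti_facilito tablero)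

-- ===== LEMMAS AND PROOFS =====
-- proof-side helpers
def pvCell (t : List (List String)) (i j : Nat) : String :=
  (t.getD i []).getD j ""

def pvColumn (t : List (List String)) (j : Nat) : List String :=
  t.map (fun fila => fila.getD j "")

-- the winning condition A tests at a window (i, j), generic in the symbol s
def pvWin (s : String) (t : List (List String)) (i j : Nat) : Bool :=
  decide (pvCell t i j = pvCell t (i+1) j ∧ pvCell t (i+1) j = pvCell t (i+2) j ∧ pvCell t i j = s)

-- recursive sliding-window view of a column
def hasTri (s : String) : List String → Bool
  | a :: b :: c :: t => (decide (a = s) && decide (b = s) && decide (c = s)) || hasTri s (b :: c :: t)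
  | _ => false

-- run-counter view of a column (Nat counter; mirrors B's inner loop)
def hasRunAux (s : String) : List String → Nat → Bool
  | [], _ => false
  | c :: t, r =>
    let r' := if c = s then r + 1 else 0
    decide (3 ≤ r') || hasRunAux s t r'

-- a fold whose body is "or each flag with a test of the element" computes two anys
theorem foldl_or_pair {α : Type} (p q : α → Bool) (f : Bool × Bool → α → Bool × Bool)
    (hf : ∀ st x, f st x = (st.1 || p x, st.2 || q x)) :
    ∀ (l : List α) (a b : Bool), l.foldl f (a, b) = (a || l.any p, b || l.any q)
  | [], a, b => by simp
  | x :: t, a, b => by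
    rw [List.foldl_cons, hf, foldl_or_pair p q f hf t]
    simp [Bool.or_assoc]

-- B's inner loop over a column computes the flags via hasRunAux
theorem runFold_eq : ∀ (col : List String) (hx ho : Bool) (rx ro : Nat),
    ((col.foldl pvRunStep (hx, ho, (rx : Int), (ro : Int))).1
        = (hx || hasRunAux "X" col rx)) ∧
    ((col.foldl pvRunStep (hx, ho, (rx : Int), (ro : Int))).2.1
        = (ho || hasRunAux "O" col ro))
  | [], hx, ho, rx, ro => by simp [hasRunAux]
  | c :: t, hx, ho, rx, ro => by
    have hstep : pvRunStep (hx, ho, (rx : Int), (ro : Int)) c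
        = (hx || decide (3 ≤ (if c = "X" then rx + 1 else 0 : Nat)),
           ho || decide (3 ≤ (if c = "O" then ro + 1 else 0 : Nat)),
           ((if c = "X" then rx + 1 else 0 : Nat) : Int),
           ((if c = "O" then ro + 1 else 0 : Nat) : Int)) := by
      simp [pvRunStep]
      split_ifs <;> simp_all <;> rw [Bool.or_comm] <;> congr 1 <;> rw [decide_eq_decide] <;> omega
    have IH := runFold_eq t (hx || decide (3 ≤ (if c = "X" then rx + 1 else 0 : Nat)))
      (ho || decide (3 ≤ (if c = "O" then ro + 1 else 0 : Nat)))
      (if c = "X" then rx + 1 else 0) (if c = "O" then ro + 1 else 0)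
    rw [List.foldl_cons, hstep]
    exact ⟨IH.1.trans (by simp [hasRunAux, Bool.or_assoc]),
           IH.2.trans (by simp [hasRunAux, Bool.or_assoc])⟩

theorem hasTri_cons_ne (s c : String) (t : List String) (hc : ¬ c = s) :
    hasTri s (c :: t) = hasTri s t := by
  match t with
  | [] => rfl
  | [a] => rfl
  | a :: b :: t' => simp [hasTri, hc]

theorem hasTri_cons_cons_ne (s a c : String) (t : List String) (hc : ¬ c = s) :
    hasTri s (a :: c :: t) = hasTri s t := by
  match t with
  | [] => rfl
  | b :: t' => simp [hasTri, hc, hasTri_cons_ne s c (b :: t') hc]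

theorem hasTri_cons₃_ne (s a b c : String) (t : List String) (hc : ¬ c = s) :
    hasTri s (a :: b :: c :: t) = hasTri s t := by
  simp [hasTri, hc, hasTri_cons_cons_ne s b c t hc]

-- the run-counter view equals the sliding-window view (counter r ≤ 2 = r virtual copies of s)
theorem hasRunAux_eq (s : String) : ∀ (col : List String) (r : Nat), r ≤ 2 →
    hasRunAux s col r = hasTri s (List.replicate r s ++ col)
  | [], r, hr => by interval_cases r <;> rfl
  | c :: t, r, hr => by
    by_cases hc : c = s
    · subst hc
      by_cases h2 : r = 2
      · subst h2
        simp [hasRunAux, hasTri]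
      · have h31 : ¬ (3 ≤ r + 1) := by omega
        have IH := hasRunAux_eq c t (r + 1) (by omega)
        rw [show List.replicate r c ++ c :: t = List.replicate (r + 1) c ++ t from by
          rw [List.replicate_succ']; simp]
        simp [hasRunAux, h31, IH]
    · have IH := hasRunAux_eq s t 0 (by omega)
      simp only [hasRunAux, if_neg hc]
      interval_cases r <;>
        simp [IH, List.replicate, hasTri_cons_ne s c t hc,
          hasTri_cons_cons_ne s s c t hc, hasTri_cons₃_ne s s s c t hc]

def pvTriAt (s : String) (col : List String) (i : Nat) : Bool :=
  decide (col.getD i "" = s ∧ col.getD (i+1) "" = s ∧ col.getD (i+2) "" = s)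

-- positional characterisation of the sliding-window view
theorem hasTri_eq_any (s : String) : ∀ (col : List String),
    hasTri s col = (List.range (col.length - 2)).any (pvTriAt s col)
  | [] => rfl
  | [a] => rfl
  | [a, b] => rfl
  | a :: b :: c :: t => by
    have IH := hasTri_eq_any s (b :: c :: t)
    rw [show (a :: b :: c :: t).length - 2 = ((b :: c :: t).length - 2) + 1 from by simp]
    rw [List.range_succ_eq_map, List.any_cons, List.any_map]
    have h0 : pvTriAt s (a :: b :: c :: t) 0 =
        (decide (a = s) && decide (b = s) && decide (c = s)) := by
      simp [pvTriAt, List.getD, Bool.and_assoc]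
    have hsucc : ∀ i, pvTriAt s (a :: b :: c :: t) (i + 1) = pvTriAt s (b :: c :: t) i := by
      intro i; simp [pvTriAt, List.getD]
    have : (fun i => pvTriAt s (a :: b :: c :: t) (Nat.succ i)) = pvTriAt s (b :: c :: t) := by
      funext i; exact hsucc i
    simp only [hasTri, Function.comp_def, this, ← IH, h0]

theorem bodyA_abstract (c1 c2 c3 : String) (st : Bool × Bool) :
    (if c1 = c2 ∧ c2 = c3 then
        (if c1 = "X" then true else st.1, if c1 = "O" then true else st.2)
      else st)
    = (st.1 || decide (c1 = c2 ∧ c2 = c3 ∧ c1 = "X"),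
       st.2 || decide (c1 = c2 ∧ c2 = c3 ∧ c1 = "O")) := by
  by_cases h : c1 = c2 ∧ c2 = c3
  · by_cases hx : c1 = "X" <;> by_cases ho : c1 = "O" <;> simp_all
  · rw [if_neg h]
    by_cases h12 : c1 = c2 <;> by_cases h23 : c2 = c3 <;> simp_all

-- A's inner loop over column indices computes the two anys of pvWin
theorem innerA_eq (t : List (List String)) (i : Nat) (st : Bool × Bool) :
    ((PySem.List.pyRange 0 (((PySem.List.pyGetD t 0 []).length : Int)) 1).foldl
        (pvBodyA t (i : Int)) st)
    = (st.1 || (List.range (PySem.List.pyGetD t 0 []).length).any (pvWin "X" t i),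
       st.2 || (List.range (PySem.List.pyGetD t 0 []).length).any (pvWin "O" t i)) := by
  obtain ⟨a, b⟩ := st
  rw [PySem.List.pyRange_zero_natCast, List.foldl_map]
  apply foldl_or_pair
  intro st j
  have e1 : ((i : Int) + 1) = ((i + 1 : Nat) : Int) := by push_cast; ring
  have e2 : ((i : Int) + 2) = ((i + 2 : Nat) : Int) := by push_cast; ring
  simp only [pvBodyA, e1, e2, PySem.List.pyGetD_natCast]
  rw [bodyA_abstract]
  simp only [pvWin, pvCell]
  rfl

-- A's whole nested loop
theorem hayA_eq (t : List (List String)) :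
    ((PySem.List.pyRange 0 ((t.length : Int) - 2) 1).foldl
      (fun (hay : Bool × Bool) i =>
        (PySem.List.pyRange 0 (((PySem.List.pyGetD t 0 []).length : Int)) 1).foldl
          (pvBodyA t i) hay) (false, false))
    = ((List.range (t.length - 2)).any (fun i =>
          (List.range (PySem.List.pyGetD t 0 []).length).any (pvWin "X" t i)),
       (List.range (t.length - 2)).any (fun i =>
          (List.range (PySem.List.pyGetD t 0 []).length).any (pvWin "O" t i))) := by
  rw [PySem.List.pyRange_one 0 ((t.length : Int) - 2), List.foldl_map]
  rw [show ((t.length : Int) - 2 - 0).toNat = t.length - 2 from by omega]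
  have h := foldl_or_pair
    (fun i => (List.range (PySem.List.pyGetD t 0 []).length).any (pvWin "X" t i))
    (fun i => (List.range (PySem.List.pyGetD t 0 []).length).any (pvWin "O" t i))
    (fun (hay : Bool × Bool) (k : Nat) =>
      (PySem.List.pyRange 0 (((PySem.List.pyGetD t 0 []).length : Int)) 1).foldl
        (pvBodyA t ((0 : Int) + (k : Int))) hay)
    (by intro st k; simp only [zero_add]; exact innerA_eq t k st)
    (List.range (t.length - 2)) false false
  simpa using h

-- B's column walk computes the flags via hasTri
theorem colB_eq (t : List (List String)) (hay : Bool × Bool) (j : Nat) :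
    pvColB t hay (j : Int)
    = (hay.1 || hasTri "X" (pvColumn t j), hay.2 || hasTri "O" (pvColumn t j)) := by
  simp only [pvColB]
  rw [show (fun (st : Bool × Bool × Int × Int) fila =>
        pvRunStep st (PySem.List.pyGetD fila (j : Int) ""))
      = fun st fila => pvRunStep st (fila.getD j "") from by
    funext st fila; rw [PySem.List.pyGetD_natCast]]
  have hmap : List.foldl pvRunStep (hay.1, hay.2, (0 : Int), (0 : Int))
        (t.map (fun fila => fila.getD j ""))
      = List.foldl (fun st fila => pvRunStep st (fila.getD j "")) (hay.1, hay.2, 0, 0) t := by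
    rw [List.foldl_map]
  rw [← hmap]
  have h0 := runFold_eq (t.map (fun fila => fila.getD j "")) hay.1 hay.2 0 0
  simp only [Nat.cast_zero] at h0
  have hr : ∀ s, hasRunAux s (t.map (fun fila => fila.getD j "")) 0
      = hasTri s (t.map (fun fila => fila.getD j "")) := by
    intro s
    rw [hasRunAux_eq s _ 0 (by omega)]
    simp
  rw [Prod.ext_iff]
  exact ⟨by rw [h0.1, hr, pvColumn], by rw [h0.2, hr, pvColumn]⟩

-- B's whole loop
theorem hayB_eq (t : List (List String)) :
    ((PySem.List.pyRange 0 (((PySem.List.pyGetD t 0 []).length : Int)) 1).foldl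
      (pvColB t) (false, false))
    = ((List.range (PySem.List.pyGetD t 0 []).length).any (fun j => hasTri "X" (pvColumn t j)),
       (List.range (PySem.List.pyGetD t 0 []).length).any (fun j => hasTri "O" (pvColumn t j))) := by
  rw [PySem.List.pyRange_zero_natCast, List.foldl_map]
  have h := foldl_or_pair
    (fun j => hasTri "X" (pvColumn t j))
    (fun j => hasTri "O" (pvColumn t j))
    (fun (hay : Bool × Bool) (k : Nat) => pvColB t hay (k : Int))
    (by intro st k; exact colB_eq t st k)
    (List.range (PySem.List.pyGetD t 0 []).length) false false
  simpa using h

theorem any_range_swap (a b : Nat) (f : Nat → Nat → Bool) :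
    (List.range a).any (fun i => (List.range b).any (f i))
    = (List.range b).any (fun j => (List.range a).any (fun i => f i j)) := by
  rw [Bool.eq_iff_iff]
  simp only [List.any_eq_true, List.mem_range]
  constructor
  · rintro ⟨i, hi, j, hj, h⟩; exact ⟨j, hj, i, hi, h⟩
  · rintro ⟨j, hj, i, hi, h⟩; exact ⟨i, hi, j, hj, h⟩

-- a column has a vertical triple of s iff some window (i, j) wins for s
theorem colTri (s : String) (t : List (List String)) (j : Nat) :
    hasTri s (pvColumn t j) = (List.range (t.length - 2)).any (fun i => pvWin s t i j) := by
  rw [hasTri_eq_any]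
  rw [show (pvColumn t j).length = t.length from by simp [pvColumn]]
  apply PySem.List.any_congr_mem
  intro i hi
  rw [List.mem_range] at hi
  have hc : ∀ k, k < t.length → (pvColumn t j).getD k "" = pvCell t k j := by
    intro k hk
    have h1 : k < (t.map (fun fila => fila.getD j "")).length := by simpa using hk
    rw [pvColumn, List.getD_eq_getElem _ _ h1, List.getElem_map, pvCell,
      List.getD_eq_getElem _ _ hk]
  rw [pvTriAt, hc i (by omega), hc (i + 1) (by omega), hc (i + 2) (by omega), pvWin,
    decide_eq_decide]
  constructor
  · rintro ⟨ha, hb, hcc⟩; exact ⟨ha.trans hb.symm, hb.trans hcc.symm, ha⟩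
  · rintro ⟨hab, hbc, has⟩
    exact ⟨has, hab.symm.trans has, hbc.symm.trans (hab.symm.trans has)⟩

-- ===== VERDICT (by name: the statement is the Claim_ definition above) =====
theorem quien_gano_el_tateti_facilito_spec : Claim_equal_quien_gano_el_tateti_facilito := by
  intro t _ _
  unfold Spec_quien_gano_el_tateti_facilito
  unfold quien_gano_el_tateti_facilito quien_gano_el_tateti_facilito_alt
  by_cases h3 : t.length < 3
  · rw [PySem.List.pyRange_one_eq_nil (by omega : (t.length : Int) - 2 ≤ 0)]
    simp [h3]
  · rw [if_neg h3, hayA_eq, hayB_eq]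
    have e : ∀ s, (List.range (t.length - 2)).any (fun i =>
          (List.range (PySem.List.pyGetD t 0 []).length).any (pvWin s t i))
        = (List.range (PySem.List.pyGetD t 0 []).length).any
            (fun j => hasTri s (pvColumn t j)) := by
      intro s
      rw [any_range_swap]
      simp only [colTri]
    rw [e "X", e "O"]
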